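-- pv_equiv track=rewrite | github.com/bssrdf/pyleet | MaximumEqualFrequency.py | maxEqualFreq
-- ===== SOURCE A (Python) =====
-- from typing import List
-- import collections
--
-- def maxEqualFreq(nums: List[int]) -> int:
--     # cnt records the occurence of each num, freq records the frequence of number of
--     # occurences. max_F is the largest frequence.
--     cnt,freq,maxF,res = collections.defaultdict(int), collections.defaultdict(int),0,0
--     for i,num in enumerate(nums):
--         cnt[num] += 1
--         freq[cnt[num]-1] -= 1
--         freq[cnt[num]] += 1
--         maxF = max(maxF,cnt[num])
--         if (maxF*freq[maxF] == i              # all elements appear max_F times, except one appears once.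
--            or (maxF-1)*(freq[maxF-1]+1) == i  # all elements appear max_F-1 times, except one appears max_F.
--            or maxF == 1): # all elements appear exact once.
--             res = i + 1
--     return res
-- ===== SOURCE B (Python) =====
-- from typing import List
-- import collections
--
-- def maxEqualFreq(nums: List[int]) -> int:
--     # Backward search over prefix lengths: recompute the count distribution of
--     # each prefix from scratch and return the first (i.e. longest) valid one.
--     for L in range(len(nums), 0, -1):
--         vals = list(collections.Counter(nums[:L]).values())
--         fc = collections.Counter(vals)
--         m = max(vals)
--         if m == 1 or m * fc[m] == L - 1 or (m - 1) * (fc[m - 1] + 1) == L - 1: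
--             return L
--     return 0
-- ===== Notes on version B (the rewrite author's own statement) =====
-- stated objective: alternative
-- what changed: B replaces A's single forward pass with incrementally maintained cnt/freq/maxF dicts by a backward search over prefix lengths that rebuilds the counter and its count distribution from scratch for each candidate prefix and returns the first (longest) valid one.
import Mathlib
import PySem

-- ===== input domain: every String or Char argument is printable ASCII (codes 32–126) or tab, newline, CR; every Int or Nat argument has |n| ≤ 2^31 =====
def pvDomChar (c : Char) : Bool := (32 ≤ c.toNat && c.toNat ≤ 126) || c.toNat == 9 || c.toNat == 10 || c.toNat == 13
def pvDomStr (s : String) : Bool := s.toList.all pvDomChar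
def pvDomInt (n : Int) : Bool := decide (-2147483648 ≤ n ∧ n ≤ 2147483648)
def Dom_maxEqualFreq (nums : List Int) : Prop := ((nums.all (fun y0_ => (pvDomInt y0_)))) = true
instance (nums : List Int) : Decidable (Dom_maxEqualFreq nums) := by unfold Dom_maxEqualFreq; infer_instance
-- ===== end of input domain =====

-- B replaces A's forward pass with incrementally maintained cnt/freq/maxF by a backward
-- search over prefix lengths, rebuilding the count distribution from scratch per prefix;
-- alternative decomposition, not faster.

-- ===== PORT A =====
def maxEqualFreqStep (st : PySem.Dict Int Int × PySem.Dict Int Int × Int × Int)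
    (pr : Int × Int) : PySem.Dict Int Int × PySem.Dict Int Int × Int × Int :=
  let i := pr.1
  let num := pr.2
  let cnt := st.1.modify num 0 (· + 1)                              -- cnt[num] += 1
  let c := cnt.getD num 0
  let freq := (st.2.1.modify (c - 1) 0 (· - 1)).modify c 0 (· + 1)  -- freq[cnt[num]-1] -= 1; freq[cnt[num]] += 1
  let maxF := max st.2.2.1 c                                        -- maxF = max(maxF, cnt[num])
  let res := if maxF * freq.getD maxF 0 == i
                || (maxF - 1) * (freq.getD (maxF - 1) 0 + 1) == i
                || maxF == 1
             then i + 1 else st.2.2.2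
  (cnt, freq, maxF, res)

def maxEqualFreq (nums : List Int) : Int :=
  ((PySem.List.enumerate nums).foldl maxEqualFreqStep
    (PySem.Dict.empty, PySem.Dict.empty, 0, 0)).2.2.2

-- ===== PORT B =====
-- validity test for one prefix p of length L: rebuild counter / distribution from scratch
def maxEqualFreqAltGood (p : List Int) : Bool :=
  let vals := (PySem.Dict.counter p).values                         -- list(Counter(nums[:L]).values())
  let fc := PySem.Dict.counter vals                                 -- fc = Counter(vals)
  let m := match PySem.List.max? vals (fun v => v) with             -- m = max(vals); p is nonempty at every call
           | some v => v
           | none => 0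
  m == 1 || m * fc.getD m 0 == (p.length : Int) - 1
    || (m - 1) * (fc.getD (m - 1) 0 + 1) == (p.length : Int) - 1

-- the backward loop: for L in range(len(nums), 0, -1): … return L / return 0
def maxEqualFreqAltRec (nums : List Int) : Nat → Int
  | 0 => 0
  | L + 1 =>
      if maxEqualFreqAltGood (PySem.List.slice nums none (some ((L : Int) + 1)))
      then (L : Int) + 1
      else maxEqualFreqAltRec nums L

def maxEqualFreq_alt (nums : List Int) : Int :=
  maxEqualFreqAltRec nums nums.length

-- ===== PRECONDITION & SPEC =====
def Spec_maxEqualFreq (nums : List Int) (out : Int) : Prop := out = maxEqualFreq_alt nums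
instance (nums : List Int) (out : Int) : Decidable (Spec_maxEqualFreq nums out) := by unfold Spec_maxEqualFreq; infer_instance

-- ===== CLAIM (what is proved, stated in full; the proofs are below) =====
def Claim_equal_maxEqualFreq : Prop := ∀ (nums : List Int), Dom_maxEqualFreq nums → Spec_maxEqualFreq nums (maxEqualFreq nums)

-- ===== LEMMAS AND PROOFS =====

-- pvF p k = how many distinct elements of p occur exactly k times; pvM p = the maximal count in p
def pvF (p : List Int) (k : Int) : Int := (((PySem.Dict.counter p).values).count k : Int)
def pvM (p : List Int) : Int := ((PySem.Dict.counter p).values).foldl max 0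

theorem pv_values_counter (p : List Int) :
    (PySem.Dict.counter p).values = (PySem.Set.ofList p).map (fun x => (p.count x : Int)) := by
  simp [PySem.Dict.values, PySem.Dict.items_counter, List.map_map]

theorem pv_values_pos (p : List Int) : ∀ v ∈ (PySem.Dict.counter p).values, 1 ≤ v := by
  intro v hv
  rw [pv_values_counter] at hv
  simp only [List.mem_map] at hv
  obtain ⟨x, hx, rfl⟩ := hv
  have : x ∈ p := (PySem.Set.mem_ofList _ _).1 hx
  have := List.count_pos_iff.2 this
  omega

theorem pv_maxB (p : List Int) (hp : p ≠ []) :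
    (match PySem.List.max? ((PySem.Dict.counter p).values) (fun v => v) with
     | some m => m
     | none => 0) = pvM p := by
  have hne : (PySem.Dict.counter p).values ≠ [] := by
    rw [pv_values_counter]
    cases p with
    | nil => exact absurd rfl hp
    | cons a t =>
      have : a ∈ PySem.Set.ofList (a :: t) := (PySem.Set.mem_ofList _ _).2 (List.mem_cons_self ..)
      intro h
      simp [List.map_eq_nil_iff] at h
      rw [h] at this; exact absurd this (List.not_mem_nil)
  obtain ⟨v, t, hvt⟩ := List.exists_cons_of_ne_nil hne
  have hv1 : 1 ≤ v := pv_values_pos p v (by rw [hvt]; exact List.mem_cons_self ..)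
  unfold pvM
  rw [hvt, PySem.List.max?_id_cons]
  have : max (0:Int) v = v := by omega
  simp [List.foldl_cons, this]

theorem pv_M_nonneg (p : List Int) : 0 ≤ pvM p := (PySem.List.le_foldl_max _ _).1

theorem pv_ofList_app (p : List Int) (num : Int) :
    PySem.Set.ofList (p ++ [num])
      = if num ∈ p then PySem.Set.ofList p else PySem.Set.ofList p ++ [num] := by
  rw [PySem.Set.ofList_append_singleton]
  by_cases h : num ∈ p <;>
    simp [PySem.Set.add, PySem.Set.contains, PySem.Set.mem_ofList, h]

theorem pv_count_app_ne (p : List Int) (num x : Int) (h : x ≠ num) :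
    ((p ++ [num]).count x) = p.count x := by
  simp [List.count_append, Ne.symm h]

theorem pv_count_app_self (p : List Int) (num : Int) :
    ((p ++ [num]).count num) = p.count num + 1 := by
  simp [List.count_append]

-- replacing g by g' at the single occurrence of num in a nodup list shifts the value counts
theorem pv_count_map_update (S : List Int) (num : Int)
    (g g' : Int → Int) (k : Int) :
    ∀ (_ : S.Nodup) (_ : num ∈ S) (_ : ∀ x ∈ S, x ≠ num → g' x = g x),
    ((S.map g').count k : Int) + (if g num = k then 1 else 0)
      = ((S.map g).count k : Int) + (if g' num = k then 1 else 0) := by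
  induction S with
  | nil => intro _ h; exact absurd h (List.not_mem_nil)
  | cons a S ih =>
    intro hnd h hagree
    rcases List.nodup_cons.1 hnd with ⟨haS, hndS⟩
    by_cases ha : a = num
    · subst ha
      have hmapeq : S.map g' = S.map g :=
        List.map_congr_left (fun x hx => hagree x (List.mem_cons_of_mem _ hx)
          (fun hxa => haS (hxa ▸ hx)))
      simp only [List.map_cons, List.count_cons, hmapeq, beq_iff_eq]
      push_cast
      split_ifs <;> omega
    · have hnum : num ∈ S := by
        rcases List.mem_cons.1 h with h1 | h2
        · exact absurd h1.symm ha
        · exact h2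
      have hga : g' a = g a := hagree a (List.mem_cons_self ..) ha
      have := ih hndS hnum (fun x hx hxn => hagree x (List.mem_cons_of_mem _ hx) hxn)
      simp only [List.map_cons, List.count_cons, hga, beq_iff_eq] at *
      push_cast at *
      split_ifs at * <;> omega

-- raising g at num to g' num ≥ g num makes the running max over the mapped list max (old, g' num)
theorem pv_foldl_max_update (S : List Int) (num : Int)
    (g g' : Int → Int) (h : num ∈ S)
    (hagree : ∀ x ∈ S, x ≠ num → g' x = g x) (hge : g num ≤ g' num) :
    (S.map g').foldl max 0 = max ((S.map g).foldl max 0) (g' num) := by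
  have h0' := PySem.List.le_foldl_max (S.map g') 0
  have h0 := PySem.List.le_foldl_max (S.map g) 0
  apply le_antisymm
  · rcases PySem.List.foldl_max_mem (S.map g') 0 with hm | hm
    · rw [hm]; exact le_max_of_le_left h0.1
    · rcases List.mem_map.1 hm with ⟨x, hx, hgx⟩
      by_cases hxn : x = num
      · rw [← hgx, hxn]; exact le_max_right _ _
      · rw [← hgx, hagree x hx hxn]
        exact le_max_of_le_left (h0.2 _ (List.mem_map_of_mem hx))
  · apply max_le
    · rcases PySem.List.foldl_max_mem (S.map g) 0 with hm | hm
      · rw [hm]; exact h0'.1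
      · rcases List.mem_map.1 hm with ⟨x, hx, hgx⟩
        by_cases hxn : x = num
        · rw [← hgx, hxn]
          exact le_trans hge (h0'.2 _ (List.mem_map_of_mem h))
        · rw [← hgx, ← hagree x hx hxn]
          exact h0'.2 _ (List.mem_map_of_mem hx)
    · exact h0'.2 _ (List.mem_map_of_mem h)

theorem pv_Fstep (p : List Int) (num : Int) (k : Int) (hk : 1 ≤ k) :
    pvF (p ++ [num]) k
      = pvF p k - (if k = (p.count num : Int) then 1 else 0)
        + (if k = (p.count num : Int) + 1 then 1 else 0) := by
  unfold pvF
  rw [pv_values_counter, pv_values_counter, pv_ofList_app]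
  have hagree : ∀ x ∈ PySem.Set.ofList p, x ≠ num →
      (fun x => (((p ++ [num]).count x : Int))) x = (fun x => ((p.count x : Int))) x := by
    intro x _ hxn
    simp [pv_count_app_ne p num x hxn]
  by_cases h : num ∈ p
  · simp only [h, if_true]
    have := pv_count_map_update (PySem.Set.ofList p) num
      (fun x => ((p.count x : Int))) (fun x => (((p ++ [num]).count x : Int))) k
      (PySem.Set.nodup_ofList p) ((PySem.Set.mem_ofList _ _).2 h) hagree
    simp only [pv_count_app_self] at this
    push_cast at this ⊢
    split_ifs at this ⊢ <;> omega
  · simp only [h, if_false]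
    have hcnt0 : p.count num = 0 := List.count_eq_zero.2 h
    have hmap : (PySem.Set.ofList p ++ [num]).map (fun x => (((p ++ [num]).count x : Int)))
        = (PySem.Set.ofList p).map (fun x => ((p.count x : Int))) ++ [((p.count num : Int)) + 1] := by
      rw [List.map_append]
      congr 1
      · exact List.map_congr_left (fun x hx => hagree x hx
          (fun hxn => h (hxn ▸ (PySem.Set.mem_ofList _ _).1 hx)))
      · simp
    rw [hmap, List.count_append, hcnt0]
    simp only [List.count_cons, List.count_nil, beq_iff_eq]
    push_cast
    split_ifs <;> omega

theorem pv_Mstep (p : List Int) (num : Int) :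
    pvM (p ++ [num]) = max (pvM p) ((p.count num : Int) + 1) := by
  unfold pvM
  rw [pv_values_counter, pv_values_counter, pv_ofList_app]
  have hagree : ∀ x ∈ PySem.Set.ofList p, x ≠ num →
      (fun x => (((p ++ [num]).count x : Int))) x = (fun x => ((p.count x : Int))) x := by
    intro x _ hxn
    simp [pv_count_app_ne p num x hxn]
  by_cases h : num ∈ p
  · simp only [h, if_true]
    have := pv_foldl_max_update (PySem.Set.ofList p) num
      (fun x => ((p.count x : Int))) (fun x => (((p ++ [num]).count x : Int)))
      ((PySem.Set.mem_ofList _ _).2 h) hagree (by simp)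
    rw [this]
    simp
  · simp only [h, if_false]
    have hmap : (PySem.Set.ofList p ++ [num]).map (fun x => (((p ++ [num]).count x : Int)))
        = (PySem.Set.ofList p).map (fun x => ((p.count x : Int))) ++ [((p.count num : Int)) + 1] := by
      rw [List.map_append]
      congr 1
      · exact List.map_congr_left (fun x hx => hagree x hx
          (fun hxn => h (hxn ▸ (PySem.Set.mem_ofList _ _).1 hx)))
      · simp
    rw [hmap, List.foldl_append]
    simp

-- proof-side forward reference run: process l after the already-seen prefix p
def pvFwd : List Int → List Int → Int → Int
  | _, [], res => res
  | p, x :: l, res =>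
      pvFwd (p ++ [x]) l
        (if maxEqualFreqAltGood (p ++ [x]) then ((p ++ [x]).length : Int) else res)

-- B's good predicate on the prefix p++[num], expressed through pvF / pvM
theorem pv_good_char (p : List Int) (num : Int) :
    maxEqualFreqAltGood (p ++ [num])
      = (pvM (p ++ [num]) == 1
         || pvM (p ++ [num]) * pvF (p ++ [num]) (pvM (p ++ [num])) == ((p ++ [num]).length : Int) - 1
         || (pvM (p ++ [num]) - 1) * (pvF (p ++ [num]) (pvM (p ++ [num]) - 1) + 1) == ((p ++ [num]).length : Int) - 1) := by
  have hfc : ∀ k : Int,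
      (PySem.Dict.counter ((PySem.Dict.counter (p ++ [num])).values)).getD k 0
        = pvF (p ++ [num]) k := by
    intro k; rw [PySem.Dict.getD_counter]; rfl
  have hmB : (match PySem.List.max? ((PySem.Dict.counter (p ++ [num])).values) (fun v => v) with
      | some m => m | none => 0) = pvM (p ++ [num]) := pv_maxB _ (by simp)
  simp only [maxEqualFreqAltGood, hfc, hmB]

-- A's loop equals the forward reference run
theorem pv_loop_eq : ∀ (l p : List Int)
    (freq : PySem.Dict Int Int) (maxF res : Int),
    (∀ k : Int, 1 ≤ k → freq.getD k 0 = pvF p k) →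
    maxF = pvM p →
    ((PySem.List.enumerate l (p.length : Int)).foldl maxEqualFreqStep
        (PySem.Dict.counter p, freq, maxF, res)).2.2.2
      = pvFwd p l res := by
  intro l
  induction l with
  | nil => intro p freq maxF res _ _; simp [PySem.List.enumerate_nil, pvFwd]
  | cons num l ih =>
    intro p freq maxF res hF hM
    rw [PySem.List.enumerate_cons]
    simp only [List.foldl_cons, maxEqualFreqStep, pvFwd]
    rw [← PySem.Dict.counter_append_singleton]
    have hc : (PySem.Dict.counter (p ++ [num])).getD num 0 = (p.count num : Int) + 1 := by
      rw [PySem.Dict.getD_counter]; push_cast [List.count_append]; simp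
    rw [hc]
    set cN : Int := (p.count num : Int) with hcN
    have hcN0 : 0 ≤ cN := by positivity
    set freq' := ((freq.modify (cN + 1 - 1) 0 (· - 1)).modify (cN + 1) 0 (· + 1)) with hfreq'
    have hF' : ∀ k : Int, 1 ≤ k → freq'.getD k 0 = pvF (p ++ [num]) k := by
      intro k hk
      have h1 : cN + 1 - 1 = cN := by ring
      simp only [hfreq', h1, PySem.Dict.getD_modify, pv_Fstep p num k hk, ← hcN]
      by_cases h2 : k = cN + 1
      · subst h2
        have hne : ¬ (cN + 1 = cN) := by omega
        simp only [hne, if_false]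
        rw [hF (cN + 1) (by omega)]
        simp only [if_true]
        ring
      · simp only [if_neg h2]
        by_cases h5 : k = cN
        · subst h5
          rw [hF cN (by omega)]
          simp only [if_true]
          ring
        · simp only [if_neg h5]
          rw [hF k hk]
          ring
    have hM' : max maxF (cN + 1) = pvM (p ++ [num]) := by
      rw [hM, pv_Mstep]
    set p' := p ++ [num] with hp'
    set MF := max maxF (cN + 1) with hMF
    have hMF1 : 1 ≤ MF := by
      have := pv_M_nonneg p; rw [hM] at *; omega
    have hMFM : MF = pvM p' := hM'
    have hlen : ((p'.length : Int)) - 1 = (p.length : Int) := by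
      simp [hp']
    have hb1 : freq'.getD MF 0 = pvF p' MF := hF' MF hMF1
    have hb2 : (MF - 1) * (freq'.getD (MF - 1) 0 + 1) = (MF - 1) * (pvF p' (MF - 1) + 1) := by
      by_cases h : MF = 1
      · rw [h]; ring_nf
      · have : 1 ≤ MF - 1 := by omega
        rw [hF' (MF - 1) this]
    have hcond : (MF * freq'.getD MF 0 == (p.length : Int)
          || (MF - 1) * (freq'.getD (MF - 1) 0 + 1) == (p.length : Int)
          || MF == 1)
        = maxEqualFreqAltGood p' := by
      rw [pv_good_char, ← hMFM, hlen, hb1, hb2]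
      cases hA : (MF * pvF p' MF == (p.length : Int)) <;>
      cases hB : ((MF - 1) * (pvF p' (MF - 1) + 1) == (p.length : Int)) <;>
      cases hC : (MF == 1) <;> rfl
    have hlen' : ((p.length : Int)) + 1 = ((p'.length : Int)) := by
      simp [hp']
    rw [hlen', hcond]
    exact ih p' freq' MF _ hF' hMFM

-- proof-side backward search: try lengths hi, hi-1, …, lo+1, default res
def pvBk (nums : List Int) (lo : Nat) (res : Int) : Nat → Int
  | 0 => res
  | h + 1 =>
      if h + 1 ≤ lo then res
      else if maxEqualFreqAltGood (nums.take (h + 1)) then ((h : Int) + 1)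
      else pvBk nums lo res h

theorem pv_bk_base (nums : List Int) (lo : Nat) (res : Int) :
    ∀ hi : Nat, hi ≤ lo → pvBk nums lo res hi = res := by
  intro hi h
  cases hi with
  | zero => rfl
  | succ h' => simp [pvBk, h]

theorem pv_bk_shift (nums : List Int) (lo : Nat) (res : Int) :
    ∀ hi : Nat, lo + 1 ≤ hi →
      pvBk nums lo res hi
        = pvBk nums (lo + 1)
            (if maxEqualFreqAltGood (nums.take (lo + 1)) then ((lo : Int) + 1) else res) hi := by
  intro hi
  induction hi with
  | zero => intro h; omega
  | succ h ihh =>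
    intro hle
    by_cases he : h + 1 = lo + 1
    · have hh : h = lo := by omega
      subst hh
      simp only [pvBk]
      have h1 : ¬ (h + 1 ≤ h) := by omega
      simp only [h1, if_false, le_refl, if_true]
      split
      · rfl
      · exact pv_bk_base nums h res h (le_refl h)
    · have hlt : lo + 1 ≤ h := by omega
      simp only [pvBk]
      have h1 : ¬ (h + 1 ≤ lo) := by omega
      have h2 : ¬ (h + 1 ≤ lo + 1) := by omega
      simp only [h1, h2, if_false]
      split
      · rfl
      · exact ihh hlt

theorem pv_fwd_eq_bk : ∀ (l p : List Int) (res : Int),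
    pvFwd p l res = pvBk (p ++ l) p.length res (p.length + l.length) := by
  intro l
  induction l with
  | nil =>
    intro p res
    simp only [pvFwd, List.append_nil, List.length_nil, Nat.add_zero]
    exact (pv_bk_base p p.length res p.length (le_refl _)).symm
  | cons x l ih =>
    intro p res
    simp only [pvFwd]
    rw [ih (p ++ [x]) _]
    have e1 : (p ++ [x]) ++ l = p ++ (x :: l) := by simp
    have e2 : (p ++ [x]).length = p.length + 1 := by simp
    have htake : (p ++ (x :: l)).take (p.length + 1) = p ++ [x] := by
      rw [← e1, ← e2]; exact List.take_left
    rw [e1, e2]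
    have e4 : p.length + (x :: l).length = (p.length + 1) + l.length := by
      simp; omega
    rw [e4, pv_bk_shift (p ++ (x :: l)) p.length res ((p.length + 1) + l.length) (by omega)]
    rw [htake]
    congr 2

theorem pv_bk_eq_rec (nums : List Int) :
    ∀ N : Nat, pvBk nums 0 0 N = maxEqualFreqAltRec nums N := by
  intro N
  induction N with
  | zero => rfl
  | succ h ihh =>
    simp only [pvBk, maxEqualFreqAltRec]
    have h1 : ¬ (h + 1 ≤ 0) := by omega
    have hslice : PySem.List.slice nums none (some ((h : Int) + 1)) = nums.take (h + 1) := by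
      have : ((h : Int) + 1) = (((h + 1 : Nat)) : Int) := by push_cast; ring
      rw [this, PySem.List.slice_to_natCast]
    simp only [h1, if_false, hslice]
    split
    · rfl
    · exact ihh

-- ===== VERDICT (by name: the statement is the Claim_ definition above) =====
theorem maxEqualFreq_spec : Claim_equal_maxEqualFreq := by
  intro nums _
  show maxEqualFreq nums = maxEqualFreq_alt nums
  have h := pv_loop_eq nums [] PySem.Dict.empty 0 0
    (by intro k hk; simp [pvF, PySem.Dict.counter, PySem.Dict.getD_empty])
    (by rfl)
  simp only [List.length_nil, Nat.cast_zero] at h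
  have h2 := pv_fwd_eq_bk nums [] 0
  simp only [List.nil_append, List.length_nil, Nat.zero_add] at h2
  rw [maxEqualFreq, maxEqualFreq_alt, ← pv_bk_eq_rec, ← h2, ← h]
  rfl
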